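-- pv_equiv track=rewrite | github.com/zjunxcr/high-freq-words | scripts/generate.py | generate_progress_dots
-- ===== SOURCE A (Python) =====
-- TOTAL_DAYS = 100  # 1000词 / 10词每天
--
-- def generate_progress_dots(current_day):
--     """生成进度条HTML"""
--     dots = []
--     for i in range(1, TOTAL_DAYS + 1):
--         if i < current_day:
--             cls = 'done'
--         elif i == current_day:
--             cls = 'current'
--         else:
--             cls = ''
--         dots.append(f'<div class="progress-dot {cls}"></div>')
--     return '\n'.join(dots)
-- ===== SOURCE B (Python) =====
-- TOTAL_DAYS = 100  # 1000词 / 10词每天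
--
-- def generate_progress_dots(current_day):
--     """生成进度条HTML (segment-repetition version)"""
--     done = min(max(current_day - 1, 0), TOTAL_DAYS)
--     cur = 1 if 1 <= current_day <= TOTAL_DAYS else 0
--     parts = (['<div class="progress-dot done"></div>'] * done
--              + ['<div class="progress-dot current"></div>'] * cur
--              + ['<div class="progress-dot "></div>'] * (TOTAL_DAYS - done - cur))
--     return '\n'.join(parts)
-- ===== Notes on version B (the rewrite author's own statement) =====
-- stated objective: alternative
-- what changed: Replaces the per-index loop with branching inside by computing three segment sizes (done/current/empty) arithmetically and building the output by list repetition of each template string, then one join.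
import Mathlib
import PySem

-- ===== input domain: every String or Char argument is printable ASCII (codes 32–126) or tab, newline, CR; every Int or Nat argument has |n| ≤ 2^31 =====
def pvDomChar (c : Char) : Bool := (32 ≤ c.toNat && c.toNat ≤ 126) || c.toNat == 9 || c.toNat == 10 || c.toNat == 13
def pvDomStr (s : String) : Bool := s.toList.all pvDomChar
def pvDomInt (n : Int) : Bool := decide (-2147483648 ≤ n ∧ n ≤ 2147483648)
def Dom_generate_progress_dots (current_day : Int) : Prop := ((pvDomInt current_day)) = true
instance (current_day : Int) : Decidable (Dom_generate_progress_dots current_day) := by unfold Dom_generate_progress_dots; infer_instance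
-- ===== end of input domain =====

-- B replaces the per-dot branch loop by three arithmetically-sized repeated segments joined once (alternative decomposition, same cost).


-- ===== PORT A =====
def generate_progress_dots (current_day : Int) : String :=
  let dots := (PySem.List.pyRange 1 101 1).foldl (fun acc i =>
      let cls : String :=
        if i < current_day then "done"
        else if i == current_day then "current"
        else ""
      acc ++ ["<div class=\"progress-dot " ++ cls ++ "\"></div>"]) []
  PySem.Str.join "\n" dots

-- ===== PORT B =====
def generate_progress_dots_alt (current_day : Int) : String :=
  let done := min (max (current_day - 1) 0) 100
  let cur : Int := if 1 ≤ current_day ∧ current_day ≤ 100 then 1 else 0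
  let parts :=
    List.replicate done.toNat "<div class=\"progress-dot done\"></div>"
      ++ List.replicate cur.toNat "<div class=\"progress-dot current\"></div>"
      ++ List.replicate (100 - done - cur).toNat "<div class=\"progress-dot \"></div>"
  PySem.Str.join "\n" parts

-- ===== PRECONDITION & SPEC =====
def Spec_generate_progress_dots (current_day : Int) (out : String) : Prop := out = generate_progress_dots_alt current_day
instance (current_day : Int) (out : String) : Decidable (Spec_generate_progress_dots current_day out) := by unfold Spec_generate_progress_dots; infer_instance

-- ===== CLAIM (what is proved, stated in full; the proofs are below) =====
def Claim_equal_generate_progress_dots : Prop := ∀ (current_day : Int), Dom_generate_progress_dots current_day → Spec_generate_progress_dots current_day (generate_progress_dots current_day)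

-- ===== LEMMAS AND PROOFS =====

-- mapping a function that is constant on an integer range gives a replicate
lemma map_const_pyRange {α : Type} (a b : Int) (g : Int → α) (v : α)
    (h : ∀ i, a ≤ i → i < b → g i = v) :
    (PySem.List.pyRange a b 1).map g = List.replicate (b - a).toNat v := by
  have h1 : (PySem.List.pyRange a b 1).map g
      = (PySem.List.pyRange a b 1).map (fun _ => v) := by
    apply List.map_congr_left
    intro i hi
    rw [PySem.List.mem_pyRange_one] at hi
    exact h i hi.1 hi.2
  rw [h1, List.map_const', PySem.List.length_pyRange_one]

-- the dot lists of A and B coincide for every current_day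
lemma dots_eq (d : Int) :
    (PySem.List.pyRange 1 101 1).map (fun i =>
        "<div class=\"progress-dot " ++
          (if i < d then "done" else if i == d then "current" else "") ++ "\"></div>")
      = List.replicate (min (max (d - 1) 0) 100).toNat "<div class=\"progress-dot done\"></div>"
          ++ List.replicate (if 1 ≤ d ∧ d ≤ 100 then (1:Int) else 0).toNat "<div class=\"progress-dot current\"></div>"
          ++ List.replicate (100 - min (max (d - 1) 0) 100 - (if 1 ≤ d ∧ d ≤ 100 then (1:Int) else 0)).toNat "<div class=\"progress-dot \"></div>" := by
  set g : Int → String := fun i =>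
    "<div class=\"progress-dot " ++
      (if i < d then "done" else if i == d then "current" else "") ++ "\"></div>" with hg
  set lo : Int := min (max d 1) 101 with hlo
  have hsplit : PySem.List.pyRange 1 101 1
      = PySem.List.pyRange 1 lo 1 ++ PySem.List.pyRange lo 101 1 :=
    PySem.List.pyRange_one_append 1 lo 101 (by omega) (by omega)
  have hdone : (PySem.List.pyRange 1 lo 1).map g
      = List.replicate (min (max (d - 1) 0) 100).toNat "<div class=\"progress-dot done\"></div>" := by
    have := map_const_pyRange 1 lo g "<div class=\"progress-dot done\"></div>"
      (by intro i h1 h2; simp only [hg]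
          rw [if_pos (by omega)]; decide)
    rw [this]
    congr 1
    omega
  by_cases hc : 1 ≤ d ∧ d ≤ 100
  · -- current dot present
    have hlod : lo = d := by omega
    have hcons : PySem.List.pyRange lo 101 1 = d :: PySem.List.pyRange (d + 1) 101 1 := by
      rw [hlod]; exact PySem.List.pyRange_one_cons (by omega)
    have hcur : g d = "<div class=\"progress-dot current\"></div>" := by
      simp only [hg]
      rw [if_neg (by omega), if_pos (by simp)]; decide
    have hrest : (PySem.List.pyRange (d + 1) 101 1).map g
        = List.replicate (100 - min (max (d - 1) 0) 100 - (if 1 ≤ d ∧ d ≤ 100 then (1:Int) else 0)).toNat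
            "<div class=\"progress-dot \"></div>" := by
      have := map_const_pyRange (d + 1) 101 g "<div class=\"progress-dot \"></div>"
        (by intro i h1 h2; simp only [hg]
            rw [if_neg (by omega), if_neg (by simp; omega)]; decide)
      rw [this, if_pos hc]
      congr 1
      omega
    rw [hsplit, List.map_append, hdone, hcons, List.map_cons, hcur, hrest, if_pos hc]
    simp
  · -- no current dot: everything from lo on is an empty dot
    have hrest : (PySem.List.pyRange lo 101 1).map g
        = List.replicate (100 - min (max (d - 1) 0) 100 - (if 1 ≤ d ∧ d ≤ 100 then (1:Int) else 0)).toNat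
            "<div class=\"progress-dot \"></div>" := by
      have := map_const_pyRange lo 101 g "<div class=\"progress-dot \"></div>"
        (by intro i h1 h2; simp only [hg]
            rw [if_neg (by omega), if_neg (by simp; omega)]; decide)
      rw [this, if_neg hc]
      congr 1
      omega
    rw [hsplit, List.map_append, hdone, hrest, if_neg hc]
    simp

-- ===== VERDICT (by name: the statement is the Claim_ definition above) =====
theorem generate_progress_dots_spec : Claim_equal_generate_progress_dots := by
  intro d _
  unfold Spec_generate_progress_dots generate_progress_dots generate_progress_dots_alt
  refine congrArg (PySem.Str.join "\n") ?_
  rw [PySem.List.foldl_append_singleton_eq_map, List.nil_append]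
  exact dots_eq d
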